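-- pv_equiv track=rewrite | github.com/mikeoborotov/mipt-bioinformatics | problem-20/problem_20.py | make_score
-- ===== SOURCE A (Python) =====
-- def make_score(peptide, spectrum):
--     linear = cyclospectrum(peptide)
--     local = spectrum.copy()
--     score = 0
--
--     for i in linear:
--         if i in local:
--             score += 1
--             local.remove(i)
--
--     return score
--
-- def cyclospectrum(peptide):
--     prefix_mass = [0]
--
--     for i in range(len(peptide)):
--         prefix_mass.append(prefix_mass[i]+peptide[i])
--
--     theoretical_spectrum = [0]
--
--     for i in range(len(prefix_mass) - 1):
--         for j in range(i + 1, len(prefix_mass)):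
--             theoretical_spectrum.append(prefix_mass[j]-prefix_mass[i])
--             if i > 0 and j < len(prefix_mass)-1:
--                 theoretical_spectrum.append(prefix_mass[-1] - (prefix_mass[j] - prefix_mass[i]))
--
--     return sorted(theoretical_spectrum)
-- ===== SOURCE B (Python) =====
-- def make_score(peptide, spectrum):
--     n = len(peptide)
--     doubled = peptide + peptide
--     masses = [0]
--     for s in range(n):
--         acc = 0
--         for L in range(1, n):
--             acc += doubled[s + L - 1]
--             masses.append(acc)
--     if n:
--         masses.append(sum(peptide))
--     avail = {}
--     for v in spectrum:
--         avail[v] = avail.get(v, 0) + 1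
--     score = 0
--     for m in masses:
--         if avail.get(m, 0) > 0:
--             score += 1
--             avail[m] = avail.get(m, 0) - 1
--     return score
-- ===== Notes on version B (the rewrite author's own statement) =====
-- stated objective: faster
-- what changed: cyclospectrum is generated as running-sum sliding windows over the doubled peptide (no prefix-mass table, no i<j index-pair differences, no sort) and scoring uses a multiplicity dictionary instead of repeated list membership tests and list.remove.
import Mathlib
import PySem

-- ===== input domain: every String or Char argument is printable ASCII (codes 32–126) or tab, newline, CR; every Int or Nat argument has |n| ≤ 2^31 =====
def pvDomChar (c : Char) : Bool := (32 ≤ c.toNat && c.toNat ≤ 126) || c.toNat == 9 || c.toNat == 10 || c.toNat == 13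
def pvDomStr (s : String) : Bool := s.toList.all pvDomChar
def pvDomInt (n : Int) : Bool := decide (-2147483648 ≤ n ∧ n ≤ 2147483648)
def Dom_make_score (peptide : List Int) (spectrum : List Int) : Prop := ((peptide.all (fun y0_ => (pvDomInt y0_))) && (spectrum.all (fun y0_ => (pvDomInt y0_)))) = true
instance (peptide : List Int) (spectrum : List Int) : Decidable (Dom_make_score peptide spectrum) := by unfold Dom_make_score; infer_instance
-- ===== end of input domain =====

-- B re-generates the cyclic spectrum as running-sum sliding windows over the doubled peptide and
-- scores with a multiplicity dictionary instead of A's prefix-mass index-pair differences, sort,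
-- and list-membership/remove scoring (objective: faster, confirmed; same
-- return value everywhere).

-- ===== PORT A =====
def cyclospectrum (peptide : List Int) : List Int :=
  let prefix_mass : List Int :=
    (PySem.List.pyRange 0 (PySem.List.len peptide) 1).foldl
      (fun pm i => pm ++ [PySem.List.pyGetD pm i 0 + PySem.List.pyGetD peptide i 0]) [0]
  let theoretical_spectrum : List Int :=
    (PySem.List.pyRange 0 (PySem.List.len prefix_mass - 1) 1).foldl
      (fun acc i =>
        (PySem.List.pyRange (i + 1) (PySem.List.len prefix_mass) 1).foldl
          (fun acc j =>
            let acc := acc ++ [PySem.List.pyGetD prefix_mass j 0 - PySem.List.pyGetD prefix_mass i 0]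
            if 0 < i ∧ j < PySem.List.len prefix_mass - 1 then
              acc ++ [PySem.List.pyGetD prefix_mass (-1) 0 -
                      (PySem.List.pyGetD prefix_mass j 0 - PySem.List.pyGetD prefix_mass i 0)]
            else acc) acc) [0]
  PySem.List.sorted theoretical_spectrum (fun x => x) false

def make_score (peptide : List Int) (spectrum : List Int) : Int :=
  let linear := cyclospectrum peptide
  (linear.foldl
    (fun (st : Int × List Int) i =>
      if st.2.contains i then (st.1 + 1, (PySem.List.remove? st.2 i).getD st.2) else st)
    (0, spectrum)).1

-- ===== PORT B =====
def make_score_alt (peptide : List Int) (spectrum : List Int) : Int :=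
  let n : Int := PySem.List.len peptide
  let doubled := peptide ++ peptide
  let masses : List Int :=
    (PySem.List.pyRange 0 n 1).foldl
      (fun ms s =>
        ((PySem.List.pyRange 1 n 1).foldl
          (fun (st : Int × List Int) L =>
            let acc := st.1 + PySem.List.pyGetD doubled (s + L - 1) 0
            (acc, st.2 ++ [acc]))
          (0, ms)).2) [0]
  let masses := if n ≠ 0 then masses ++ [peptide.sum] else masses
  let avail := spectrum.foldl (fun d v => d.modify v 0 (· + 1)) (PySem.Dict.empty : PySem.Dict Int Int)
  (masses.foldl
    (fun (st : Int × PySem.Dict Int Int) m =>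
      if st.2.getD m 0 > 0 then (st.1 + 1, st.2.modify m 0 (· - 1)) else st)
    (0, avail)).1

-- ===== PRECONDITION & SPEC =====
def Spec_make_score (peptide : List Int) (spectrum : List Int) (out : Int) : Prop := out = make_score_alt peptide spectrum
instance (peptide : List Int) (spectrum : List Int) (out : Int) : Decidable (Spec_make_score peptide spectrum out) := by unfold Spec_make_score; infer_instance

-- ===== CLAIM (what is proved, stated in full; the proofs are below) =====
def Claim_equal_make_score : Prop := ∀ (peptide : List Int) (spectrum : List Int), Dom_make_score peptide spectrum → Spec_make_score peptide spectrum (make_score peptide spectrum)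

-- ===== LEMMAS AND PROOFS =====

/-- prefix-sum of the first `k` masses -/
def spc (p : List Int) (k : Nat) : Int := (p.take k).sum

/-- mass of the window of length `L` starting at `s` in the doubled peptide -/
def win (p : List Int) (s L : Nat) : Int := (((p ++ p).drop s).take L).sum

/-- canonical form of A's (unsorted) theoretical spectrum -/
def TA (p : List Int) : List Int :=
  0 :: (List.range p.length).flatMap (fun i =>
    (List.range (p.length - i)).flatMap (fun k =>
      [spc p (i + 1 + k) - spc p i] ++
      (if 0 < i ∧ i + 1 + k < p.length then
        [spc p p.length - (spc p (i + 1 + k) - spc p i)] else [])))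

/-- canonical form of B's masses list -/
def TB (p : List Int) : List Int :=
  (0 :: (List.range p.length).flatMap (fun s =>
    (List.range (p.length - 1)).map (fun t => win p s (t + 1)))) ++
  (if p.length ≠ 0 then [p.sum] else [])

lemma spc_zero (p : List Int) : spc p 0 = 0 := rfl

lemma spc_len (p : List Int) : spc p p.length = p.sum := by
  simp [spc]

lemma win_succ (p : List Int) (s k : Nat) :
    win p s (k + 1) = win p s k + (p ++ p).getD (s + k) 0 := by
  unfold win
  rw [List.take_add_one, List.sum_append]
  congr 1
  rw [List.getElem?_drop, List.getD_eq_getElem?_getD]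
  cases h : (p ++ p)[s + k]? <;> simp

lemma win_char (p : List Int) (s L : Nat) (hs : s < p.length) :
    win p s L = if s + L ≤ p.length then spc p (s + L) - spc p s
                else spc p p.length - (spc p s - spc p (s + L - p.length)) := by
  unfold win
  have hslen : s ≤ p.length := le_of_lt hs
  rw [List.drop_append, Nat.sub_eq_zero_of_le hslen, List.drop_zero]
  rw [List.take_append, List.sum_append]
  have hdl : (p.drop s).length = p.length - s := List.length_drop
  by_cases hc : s + L ≤ p.length
  · rw [if_pos hc]
    have h0 : L - (p.drop s).length = 0 := by rw [hdl]; omega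
    rw [h0, List.take_zero, List.sum_nil]
    have ht := congrArg List.sum (List.take_add (l := p) (i := s) (j := L))
    rw [List.sum_append] at ht
    simp only [spc]
    omega
  · rw [if_neg hc]
    have h1 : (p.drop s).take L = p.drop s := List.take_of_length_le (by rw [hdl]; omega)
    have h2 : L - (p.drop s).length = s + L - p.length := by rw [hdl]; omega
    rw [h1, h2]
    have h3 := congrArg List.sum (List.take_append_drop s p)
    rw [List.sum_append] at h3
    simp only [spc, List.take_length]
    omega

lemma spc_succ (p : List Int) (k : Nat) (h : k < p.length) :
    spc p (k + 1) = spc p k + p[k] := by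
  unfold spc
  rw [List.take_add_one, List.sum_append, List.getElem?_eq_getElem h]
  simp

lemma prefix_aux (p : List Int) : ∀ (k : Nat), k ≤ p.length →
    (PySem.List.pyRange 0 (k : Int) 1).foldl
      (fun pm i => pm ++ [PySem.List.pyGetD pm i 0 + PySem.List.pyGetD p i 0]) [0]
    = (List.range (k + 1)).map (spc p) := by
  intro k
  induction k with
  | zero =>
    intro _
    simp [PySem.List.pyRange_one_eq_nil, spc]
  | succ k ih =>
    intro hk
    have hk' : k ≤ p.length := by omega
    have hcast : ((k : Int) + 1) = ((k + 1 : Nat) : Int) := by push_cast; ring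
    rw [← hcast, PySem.List.pyRange_one_succ_right (by positivity), List.foldl_append, ih hk']
    simp only [List.foldl_cons, List.foldl_nil]
    rw [show ((k : Int)) = ((k : Nat) : Int) from rfl]
    rw [PySem.List.pyGetD_natCast, PySem.List.pyGetD_natCast]
    rw [PySem.List.getD_map_range _ _ _ _ (by omega)]
    rw [List.getD_eq_getElem _ _ (by omega : k < p.length)]
    rw [← spc_succ p k (by omega)]
    rw [List.range_succ (n := k + 1), List.map_append]
    rfl

lemma prefix_eq (p : List Int) :
    (PySem.List.pyRange 0 (PySem.List.len p) 1).foldl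
      (fun pm i => pm ++ [PySem.List.pyGetD pm i 0 + PySem.List.pyGetD p i 0]) [0]
    = (List.range (p.length + 1)).map (spc p) := by
  have h := prefix_aux p p.length le_rfl
  simpa [PySem.List.len_eq] using h

lemma theor_aux (p : List Int) :
    (PySem.List.pyRange 0 (PySem.List.len ((List.range (p.length + 1)).map (spc p)) - 1) 1).foldl
      (fun acc i =>
        (PySem.List.pyRange (i + 1) (PySem.List.len ((List.range (p.length + 1)).map (spc p))) 1).foldl
          (fun acc j =>
            let acc := acc ++ [PySem.List.pyGetD ((List.range (p.length + 1)).map (spc p)) j 0 -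
                               PySem.List.pyGetD ((List.range (p.length + 1)).map (spc p)) i 0]
            if 0 < i ∧ j < PySem.List.len ((List.range (p.length + 1)).map (spc p)) - 1 then
              acc ++ [PySem.List.pyGetD ((List.range (p.length + 1)).map (spc p)) (-1) 0 -
                      (PySem.List.pyGetD ((List.range (p.length + 1)).map (spc p)) j 0 -
                       PySem.List.pyGetD ((List.range (p.length + 1)).map (spc p)) i 0)]
            else acc) acc) [0]
    = TA p := by
  have hlen : PySem.List.len ((List.range (p.length + 1)).map (spc p)) = (p.length : Int) + 1 := by
    simp [PySem.List.len_eq]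
  have hsub : (p.length : Int) + 1 - 1 = (p.length : Int) := by ring
  have hget : ∀ (j : Nat), j ≤ p.length →
      PySem.List.pyGetD ((List.range (p.length + 1)).map (spc p)) ((j : Nat) : Int) 0 = spc p j := by
    intro j hj
    rw [PySem.List.pyGetD_natCast, PySem.List.getD_map_range _ _ _ _ (by omega)]
  have hneg : PySem.List.pyGetD ((List.range (p.length + 1)).map (spc p)) (-1) 0 = spc p p.length := by
    have h1 := PySem.List.pyGetD_neg_one ((List.range (p.length + 1)).map (spc p)) 0 (by simp)
    rw [h1, List.getLast_eq_getElem]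
    simp
  simp only [hlen, hsub]
  rw [PySem.List.pyRange_one 0]
  simp only [sub_zero, Int.toNat_natCast, zero_add]
  rw [List.foldl_map]
  have hbody : ∀ a ∈ List.range p.length, ∀ (acc : List Int),
      ((PySem.List.pyRange ((a : Int) + 1) ((p.length : Int) + 1) 1).foldl
          (fun acc j =>
            let acc2 := acc ++ [PySem.List.pyGetD ((List.range (p.length + 1)).map (spc p)) j 0 -
                               PySem.List.pyGetD ((List.range (p.length + 1)).map (spc p)) ((a : Int)) 0]
            if 0 < ((a : Int)) ∧ j < (p.length : Int) then
              acc2 ++ [PySem.List.pyGetD ((List.range (p.length + 1)).map (spc p)) (-1) 0 -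
                      (PySem.List.pyGetD ((List.range (p.length + 1)).map (spc p)) j 0 -
                       PySem.List.pyGetD ((List.range (p.length + 1)).map (spc p)) ((a : Int)) 0)]
            else acc2) acc)
      = acc ++ ((List.range (p.length - a)).flatMap (fun k =>
          [spc p (a + 1 + k) - spc p a] ++
          (if 0 < a ∧ a + 1 + k < p.length then
            [spc p p.length - (spc p (a + 1 + k) - spc p a)] else []))) := by
    intro a hmem acc
    simp only [List.mem_range] at hmem
    rw [PySem.List.pyRange_one]
    have htn : ((p.length : Int) + 1 - ((a : Int) + 1)).toNat = p.length - a := by omega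
    rw [htn, List.foldl_map]
    have hinner : ∀ k ∈ List.range (p.length - a), ∀ (acc2 : List Int),
        (let acc3 := acc2 ++ [PySem.List.pyGetD ((List.range (p.length + 1)).map (spc p)) ((a : Int) + 1 + (k : Int)) 0 -
                             PySem.List.pyGetD ((List.range (p.length + 1)).map (spc p)) ((a : Int)) 0]
         if 0 < ((a : Int)) ∧ ((a : Int) + 1 + (k : Int)) < (p.length : Int) then
           acc3 ++ [PySem.List.pyGetD ((List.range (p.length + 1)).map (spc p)) (-1) 0 -
                   (PySem.List.pyGetD ((List.range (p.length + 1)).map (spc p)) ((a : Int) + 1 + (k : Int)) 0 -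
                    PySem.List.pyGetD ((List.range (p.length + 1)).map (spc p)) ((a : Int)) 0)]
         else acc3)
        = acc2 ++ ([spc p (a + 1 + k) - spc p a] ++
            (if 0 < a ∧ a + 1 + k < p.length then
              [spc p p.length - (spc p (a + 1 + k) - spc p a)] else [])) := by
      intro k hk acc2
      simp only [List.mem_range] at hk
      have hj : (a : Int) + 1 + (k : Int) = ((a + 1 + k : Nat) : Int) := by push_cast; ring
      rw [hj, hget (a + 1 + k) (by omega), hget a (by omega), hneg]
      by_cases hC : 0 < a ∧ a + 1 + k < p.length
      · rw [if_pos (by exact_mod_cast hC), if_pos hC, List.append_assoc]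
      · rw [if_neg (by exact_mod_cast hC), if_neg hC, List.append_nil]
    rw [PySem.List.foldl_congr_mem' _ _ _ _ hinner]
    rw [PySem.List.foldl_append_eq_flatMap]
  rw [PySem.List.foldl_congr_mem' _ _ _ _ hbody]
  rw [PySem.List.foldl_append_eq_flatMap]
  rfl

lemma theor_eq (p : List Int) :
    cyclospectrum p = PySem.List.sorted (TA p) (fun x => x) false := by
  unfold cyclospectrum
  simp only [prefix_eq]
  rw [theor_aux]

def BmassesCore (p : List Int) : List Int :=
  (PySem.List.pyRange 0 (PySem.List.len p) 1).foldl
    (fun ms s =>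
      ((PySem.List.pyRange 1 (PySem.List.len p) 1).foldl
        (fun (st : Int × List Int) L =>
          let acc := st.1 + PySem.List.pyGetD (p ++ p) (s + L - 1) 0
          (acc, st.2 ++ [acc]))
        (0, ms)).2) [0]

def Bmasses (p : List Int) : List Int :=
  if (PySem.List.len p) ≠ 0 then BmassesCore p ++ [p.sum] else BmassesCore p

lemma alt_eq (p s : List Int) :
    make_score_alt p s =
    ((Bmasses p).foldl
      (fun (st : Int × PySem.Dict Int Int) m =>
        if st.2.getD m 0 > 0 then (st.1 + 1, st.2.modify m 0 (· - 1)) else st)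
      (0, s.foldl (fun d v => d.modify v 0 (· + 1)) (PySem.Dict.empty : PySem.Dict Int Int))).1 := by
  rfl

lemma innerB (p : List Int) (s : Nat) : ∀ (k : Nat) (ms : List Int),
    (PySem.List.pyRange 1 (k : Int) 1).foldl
      (fun (st : Int × List Int) L =>
        let acc := st.1 + PySem.List.pyGetD (p ++ p) ((s : Int) + L - 1) 0
        (acc, st.2 ++ [acc]))
      (0, ms)
    = (win p s (k - 1), ms ++ (List.range (k - 1)).map (fun t => win p s (t + 1))) := by
  intro k
  induction k with
  | zero =>
    intro ms
    rw [PySem.List.pyRange_one_eq_nil (by norm_num)]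
    simp [win]
  | succ k ih =>
    intro ms
    by_cases hk : k = 0
    · subst hk
      rw [PySem.List.pyRange_one_eq_nil (by norm_num)]
      simp [win]
    · have hk1 : 1 ≤ k := Nat.one_le_iff_ne_zero.mpr hk
      have hcast : ((k + 1 : Nat) : Int) = (k : Int) + 1 := by push_cast; ring
      rw [hcast, PySem.List.pyRange_one_succ_right (by exact_mod_cast hk1), List.foldl_append, ih ms]
      simp only [List.foldl_cons, List.foldl_nil]
      have hidx : (s : Int) + (k : Int) - 1 = ((s + (k - 1) : Nat) : Int) := by
        push_cast [hk1]; omega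
      rw [hidx, PySem.List.pyGetD_natCast]
      have hwin : win p s (k - 1) + (p ++ p).getD (s + (k - 1)) 0 = win p s k := by
        rw [← win_succ p s (k - 1)]
        congr 1
        omega
      have hrange : List.range k = List.range (k - 1) ++ [k - 1] := by
        conv_lhs => rw [show k = (k - 1) + 1 by omega, List.range_succ]
      rw [Prod.mk.injEq]
      constructor <;> simp only [Nat.add_sub_cancel]
      · exact hwin
      · rw [hrange, List.map_append, ← List.append_assoc]
        simp only [List.map_cons, List.map_nil]
        rw [show k - 1 + 1 = k by omega, hwin]

lemma core_eq (p : List Int) :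
    BmassesCore p = 0 :: (List.range p.length).flatMap (fun s =>
      (List.range (p.length - 1)).map (fun t => win p s (t + 1))) := by
  unfold BmassesCore
  simp only [PySem.List.len_eq]
  rw [PySem.List.pyRange_one 0]
  simp only [sub_zero, Int.toNat_natCast, zero_add]
  rw [List.foldl_map]
  have hbody : ∀ a ∈ List.range p.length, ∀ (ms : List Int),
      ((PySem.List.pyRange 1 ((p.length : Int)) 1).foldl
        (fun (st : Int × List Int) L =>
          let acc := st.1 + PySem.List.pyGetD (p ++ p) ((a : Int) + L - 1) 0
          (acc, st.2 ++ [acc]))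
        (0, ms)).2
      = ms ++ (List.range (p.length - 1)).map (fun t => win p a (t + 1)) := by
    intro a _ ms
    rw [innerB p a p.length ms]
  rw [PySem.List.foldl_congr_mem' _ _ _ _ hbody]
  rw [PySem.List.foldl_append_eq_flatMap]
  rfl

lemma masses_eq (p : List Int) : Bmasses p = TB p := by
  unfold Bmasses TB
  simp only [PySem.List.len_eq]
  by_cases h : p.length = 0
  · rw [if_neg (by simpa using h), if_neg (by simpa using h)]
    rw [core_eq, h]
    simp
  · rw [if_pos (by exact_mod_cast h), if_pos h, core_eq]

lemma count_flatMap {α : Type} (l : List α) (g : α → List Int) (v : Int) :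
    ((l.flatMap g).count v) = (l.map (fun x => (g x).count v)).sum := by
  induction l with
  | nil => simp
  | cons a l ih => simp [List.flatMap_cons, List.count_append, ih]

lemma sum_map_range (f : Nat → Nat) (m : Nat) :
    ((List.range m).map f).sum = ∑ k ∈ Finset.range m, f k := by
  induction m with
  | zero => simp
  | succ m ih => simp [List.range_succ, Finset.sum_range_succ, ih]

lemma trunc_sum (M m : Nat) (h : m ≤ M) (f : Nat → Nat) :
    (∑ t ∈ Finset.range M, if t < m then f t else 0) = ∑ t ∈ Finset.range m, f t := by
  rw [← Finset.sum_filter]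
  apply Finset.sum_congr
  · ext t; simp [Finset.mem_filter, Finset.mem_range]; omega
  · intro _ _; rfl

lemma key_d (n : Nat) (P : Nat → Int) (hP0 : P 0 = 0) (f : Int → Nat) :
    (∑ i ∈ Finset.range n, ∑ k ∈ Finset.range (n - i), f (P (i+1+k) - P i))
    = (∑ s ∈ Finset.range n, ∑ t ∈ Finset.range (n-1),
        if s+t+1 ≤ n then f (P (s+t+1) - P s) else 0)
      + (if n ≠ 0 then f (P n) else 0) := by
  by_cases hn : n = 0
  · subst hn; simp
  have hper : ∀ i ∈ Finset.range n, (∑ k ∈ Finset.range (n - i), f (P (i+1+k) - P i))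
      = (∑ t ∈ Finset.range (n-1), if i+t+1 ≤ n then f (P (i+t+1) - P i) else 0)
        + (if i = 0 then f (P n) else 0) := by
    intro i hi
    rw [Finset.mem_range] at hi
    by_cases hi0 : i = 0
    · subst hi0
      rw [if_pos rfl]
      have hcond : ∀ t ∈ Finset.range (n-1),
          (if 0+t+1 ≤ n then f (P (0+t+1) - P 0) else 0) = f (P (0+1+t) - P 0) := by
        intro t ht
        rw [Finset.mem_range] at ht
        rw [if_pos (by omega)]
        have he : 0+t+1 = 0+1+t := by ring
        rw [he]
      rw [Finset.sum_congr rfl hcond]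
      have hsz : n - 0 = (n-1) + 1 := by omega
      rw [hsz, Finset.sum_range_succ]
      congr 1
      rw [hP0]
      have he : 0+1+(n-1) = n := by omega
      rw [he, sub_zero]
    · rw [if_neg hi0, add_zero]
      have hcond : ∀ t ∈ Finset.range (n-1),
          (if i+t+1 ≤ n then f (P (i+t+1) - P i) else 0)
          = (if t < n - i then f (P (i+1+t) - P i) else 0) := by
        intro t _
        by_cases hc : i+t+1 ≤ n
        · rw [if_pos hc, if_pos (by omega)]
          have he : i+t+1 = i+1+t := by ring
          rw [he]
        · rw [if_neg hc, if_neg (by omega)]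
      rw [Finset.sum_congr rfl hcond, trunc_sum _ _ (by omega)]
  rw [Finset.sum_congr rfl hper, Finset.sum_add_distrib]
  congr 1
  rw [Finset.sum_ite_eq' (Finset.range n) 0 (fun _ => f (P n))]
  rw [if_pos (Finset.mem_range.mpr (by omega)), if_pos hn]

lemma key_w (n : Nat) (P : Nat → Int) (f : Int → Nat) :
    (∑ i ∈ Finset.range n, ∑ k ∈ Finset.range (n - i),
      if 0 < i ∧ i+1+k < n then f (P n - (P (i+1+k) - P i)) else 0)
    = ∑ s ∈ Finset.range n, ∑ t ∈ Finset.range (n-1),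
        if n < s+t+1 then f (P n - (P s - P (s+t+1-n))) else 0 := by
  have hext : ∀ i ∈ Finset.range n,
      (∑ k ∈ Finset.range (n - i), if 0 < i ∧ i+1+k < n then f (P n - (P (i+1+k) - P i)) else 0)
      = ∑ k ∈ Finset.range n, if 0 < i ∧ i+1+k < n then f (P n - (P (i+1+k) - P i)) else 0 := by
    intro i hi
    rw [Finset.mem_range] at hi
    have hsub : Finset.range (n - i) ⊆ Finset.range n := by
      intro x hx
      rw [Finset.mem_range] at hx ⊢
      omega
    apply Finset.sum_subset hsub
    intro k hkn hk
    rw [Finset.mem_range] at hk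
    apply if_neg
    rintro ⟨h1, h2⟩
    omega
  rw [Finset.sum_congr rfl hext, ← Finset.sum_product', ← Finset.sum_filter, ← Finset.sum_product', ← Finset.sum_filter]
  apply Finset.sum_nbij' (i := fun q => (q.1+1+q.2, n-2-q.2)) (j := fun q => (q.1+q.2+1-n, n-2-q.2))
  · intro q hq
    simp only [Finset.mem_filter, Finset.mem_product, Finset.mem_range] at hq ⊢
    omega
  · intro q hq
    simp only [Finset.mem_filter, Finset.mem_product, Finset.mem_range] at hq ⊢
    omega
  · intro q hq
    simp only [Finset.mem_filter, Finset.mem_product, Finset.mem_range] at hq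
    have h1 : q.1+1+q.2 + (n-2-q.2) + 1 - n = q.1 := by omega
    have h2 : n-2-(n-2-q.2) = q.2 := by omega
    rw [h1, h2]
  · intro q hq
    simp only [Finset.mem_filter, Finset.mem_product, Finset.mem_range] at hq
    have h1 : (q.1+q.2+1-n)+1+(n-2-q.2) = q.1 := by omega
    have h2 : n-2-(n-2-q.2) = q.2 := by omega
    rw [h1, h2]
  · intro q hq
    simp only [Finset.mem_filter, Finset.mem_product, Finset.mem_range] at hq
    have h1 : (q.1+1+q.2) + (n-2-q.2) + 1 - n = q.1 := by omega
    rw [h1]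

/-- the core combinatorial identity between index-pair differences and cyclic windows -/
lemma key (n : Nat) (P : Nat → Int) (hP0 : P 0 = 0) (f : Int → Nat) :
    (∑ i ∈ Finset.range n, ∑ k ∈ Finset.range (n - i),
      (f (P (i+1+k) - P i) + if 0 < i ∧ i+1+k < n then f (P n - (P (i+1+k) - P i)) else 0))
    = (∑ s ∈ Finset.range n, ∑ t ∈ Finset.range (n-1),
        f (if s + (t+1) ≤ n then P (s+(t+1)) - P s else P n - (P s - P (s+(t+1)-n))))
      + (if n ≠ 0 then f (P n) else 0) := by
  have hsplit : ∀ s ∈ Finset.range n, ∀ t ∈ Finset.range (n-1),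
      f (if s + (t+1) ≤ n then P (s+(t+1)) - P s else P n - (P s - P (s+(t+1)-n)))
      = (if s+t+1 ≤ n then f (P (s+t+1) - P s) else 0)
        + (if n < s+t+1 then f (P n - (P s - P (s+t+1-n))) else 0) := by
    intro s _ t _
    by_cases hc : s + t + 1 ≤ n
    · rw [if_pos (by omega : s + (t+1) ≤ n), if_pos hc, if_neg (by omega)]
      have he : s + (t+1) = s + t + 1 := by ring
      rw [he]
      omega
    · rw [if_neg (by omega), if_neg hc, if_pos (by omega)]
      have he : s + (t+1) - n = s + t + 1 - n := by omega
      rw [he]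
      omega
  rw [Finset.sum_congr rfl (fun s hs => Finset.sum_congr rfl (fun t ht => hsplit s hs t ht))]
  simp only [Finset.sum_add_distrib]
  have hd := key_d n P hP0 f
  have hw := key_w n P f
  omega

lemma count_single (x v : Int) : ([x]).count v = if x = v then 1 else 0 := by
  simp [List.count_singleton, beq_iff_eq]

lemma count_map_range (g : Nat → Int) (m : Nat) (v : Int) :
    (((List.range m).map g).count v) = ∑ t ∈ Finset.range m, if g t = v then 1 else 0 := by
  induction m with
  | zero => simp
  | succ m ih =>
    rw [List.range_succ, List.map_append, List.count_append, Finset.sum_range_succ, ih]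
    simp only [List.map_cons, List.map_nil]
    rw [count_single]

lemma count_TA_TB (p : List Int) (v : Int) : (TA p).count v = (TB p).count v := by
  unfold TA TB
  rw [List.count_append, List.count_cons, List.count_cons]
  rw [count_flatMap, count_flatMap, sum_map_range, sum_map_range]
  have hA : ∀ i ∈ Finset.range p.length,
      (((List.range (p.length - i)).flatMap (fun k =>
        [spc p (i+1+k) - spc p i] ++
        (if 0 < i ∧ i+1+k < p.length then
          [spc p p.length - (spc p (i+1+k) - spc p i)] else []))).count v)
      = ∑ k ∈ Finset.range (p.length - i),
          ((if spc p (i+1+k) - spc p i = v then 1 else 0) +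
           if 0 < i ∧ i+1+k < p.length then
             (if spc p p.length - (spc p (i+1+k) - spc p i) = v then 1 else 0) else 0) := by
    intro i _
    rw [count_flatMap, sum_map_range]
    apply Finset.sum_congr rfl
    intro k _
    rw [List.count_append, count_single]
    by_cases hC : 0 < i ∧ i+1+k < p.length
    · rw [if_pos hC, if_pos hC, count_single]
    · rw [if_neg hC, if_neg hC]
      simp
  have hB : ∀ s ∈ Finset.range p.length,
      (((List.range (p.length - 1)).map (fun t => win p s (t+1))).count v)
      = ∑ t ∈ Finset.range (p.length - 1),
          (if (if s+(t+1) ≤ p.length then spc p (s+(t+1)) - spc p s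
               else spc p p.length - (spc p s - spc p (s+(t+1) - p.length))) = v then 1 else 0) := by
    intro s hs
    rw [count_map_range]
    apply Finset.sum_congr rfl
    intro t _
    rw [win_char p s (t+1) (Finset.mem_range.mp hs)]
  rw [Finset.sum_congr rfl hA, Finset.sum_congr rfl hB]
  have hkey := key p.length (spc p) (spc_zero p) (fun x => if x = v then 1 else 0)
  simp only at hkey
  have hextra : ((if p.length ≠ 0 then [p.sum] else []).count v)
      = (if p.length ≠ 0 then (if spc p p.length = v then 1 else 0) else 0) := by
    by_cases hn : p.length = 0
    · simp [hn]
    · rw [if_pos hn, if_pos hn, count_single, spc_len]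
  rw [hextra]
  omega

lemma perm_TA_TB (p : List Int) : (TA p).Perm (TB p) := by
  exact List.perm_iff_count.mpr (count_TA_TB p)

lemma scoreL_card (l : List Int) : ∀ (loc : List Int) (c : Int),
    (l.foldl
      (fun (st : Int × List Int) i =>
        if st.2.contains i then (st.1 + 1, (PySem.List.remove? st.2 i).getD st.2) else st)
      (c, loc)).1 = c + (((l : Multiset Int) ∩ (loc : Multiset Int)).card : Int) := by
  induction l with
  | nil => simp
  | cons a l ih =>
    intro loc c
    by_cases h : a ∈ loc
    · have hc : loc.contains a = true := by simpa using h
      rw [List.foldl_cons, if_pos hc]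
      rw [PySem.List.remove?_eq_some_erase loc a h, Option.getD_some, ih]
      rw [← Multiset.cons_coe, Multiset.cons_inter_of_pos _ h, ← Multiset.coe_erase]
      push_cast [Multiset.card_cons]
      ring
    · have hc : ¬ loc.contains a = true := by simpa using h
      rw [List.foldl_cons, if_neg hc, ih]
      rw [← Multiset.cons_coe, Multiset.cons_inter_of_neg _ h]

lemma scoreD_card (l : List Int) : ∀ (loc : List Int) (d : PySem.Dict Int Int) (c : Int),
    (∀ v, d.getD v 0 = (loc.count v : Int)) →
    (l.foldl
      (fun (st : Int × PySem.Dict Int Int) m =>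
        if st.2.getD m 0 > 0 then (st.1 + 1, st.2.modify m 0 (· - 1)) else st)
      (c, d)).1 = c + (((l : Multiset Int) ∩ (loc : Multiset Int)).card : Int) := by
  induction l with
  | nil => intro loc d c _; simp
  | cons a l ih =>
    intro loc d c hrel
    by_cases h : a ∈ loc
    · have hpos : d.getD a 0 > 0 := by
        rw [hrel a]
        exact_mod_cast List.count_pos_iff.mpr h
      have hrel' : ∀ v, (d.modify a 0 (· - 1)).getD v 0 = (((loc.erase a).count v : Nat) : Int) := by
        intro v
        by_cases hv : v = a
        · subst hv
          rw [PySem.Dict.getD_modify_self, hrel v, List.count_erase_self]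
          have : 0 < loc.count v := List.count_pos_iff.mpr h
          omega
        · rw [PySem.Dict.getD_modify_of_ne _ _ _ hv, hrel v, List.count_erase_of_ne hv]
      rw [List.foldl_cons, if_pos hpos, ih (loc.erase a) _ _ hrel']
      rw [← Multiset.cons_coe, Multiset.cons_inter_of_pos _ h, ← Multiset.coe_erase]
      push_cast [Multiset.card_cons]
      ring
    · have hz : ¬ d.getD a 0 > 0 := by
        rw [hrel a]
        simp [List.count_eq_zero_of_not_mem h]
      rw [List.foldl_cons, if_neg hz, ih loc d c hrel]
      rw [← Multiset.cons_coe, Multiset.cons_inter_of_neg _ h]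

-- ===== VERDICT (by name: the statement is the Claim_ definition above) =====
theorem make_score_spec : Claim_equal_make_score := by
  intro p s _
  unfold Spec_make_score
  have h1 : make_score p s = 0 + (((cyclospectrum p : Multiset Int) ∩ (s : Multiset Int)).card : Int) :=
    scoreL_card (cyclospectrum p) s 0
  have hrel : ∀ v, (s.foldl (fun d v => d.modify v 0 (· + 1))
      (PySem.Dict.empty : PySem.Dict Int Int)).getD v 0 = ((s.count v : Nat) : Int) := by
    intro v
    rw [PySem.Dict.getD_foldl_modify_add_one]
    simp [pysem]
  have h2 : make_score_alt p s = 0 + (((Bmasses p : Multiset Int) ∩ (s : Multiset Int)).card : Int) := by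
    rw [alt_eq]
    exact scoreD_card (Bmasses p) s _ 0 hrel
  have hperm : (cyclospectrum p).Perm (Bmasses p) := by
    rw [theor_eq, masses_eq]
    exact (PySem.List.sorted_perm (TA p) (fun x => x) false).trans (perm_TA_TB p)
  rw [h1, h2, Multiset.coe_eq_coe.mpr hperm]
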